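-- pv_equiv track=rewrite | github.com/stevemarvell/legal-easy | backend/app/services/rag_service.py | _apply_content_length_filter
-- ===== SOURCE A (Python) =====
-- from typing import List, Optional
--
-- def _apply_content_length_filter(corpus: List[dict], length_filter: str) -> List[dict]:
--     """Apply content length filtering"""
--     if length_filter == "short":
--         return [doc for doc in corpus if len(doc.get('content', '')) < 200]
--     elif length_filter == "medium":
--         return [doc for doc in corpus if 200 <= len(doc.get('content', '')) < 500]
--     elif length_filter == "long":
--         return [doc for doc in corpus if len(doc.get('content', '')) >= 500]
--     else:
--         return corpus
-- ===== SOURCE B (Python) =====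
-- from typing import List
--
-- def _apply_content_length_filter(corpus: List[dict], length_filter: str) -> List[dict]:
--     """Classify each doc once into one of three buckets, then select the requested bucket."""
--     buckets = {"short": [], "medium": [], "long": []}
--     for doc in corpus:
--         n = len(doc.get('content', ''))
--         category = "short" if n < 200 else ("medium" if n < 500 else "long")
--         buckets[category].append(doc)
--     return buckets.get(length_filter, corpus)
-- ===== Notes on version B (the rewrite author's own statement) =====
-- stated objective: alternative
-- what changed: Instead of choosing a branch and filtering by that branch's predicate, B makes one classification pass that partitions every doc into short/medium/long buckets and then returns the bucket named by length_filter (or the corpus unchanged for unknown categories).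
import Mathlib
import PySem

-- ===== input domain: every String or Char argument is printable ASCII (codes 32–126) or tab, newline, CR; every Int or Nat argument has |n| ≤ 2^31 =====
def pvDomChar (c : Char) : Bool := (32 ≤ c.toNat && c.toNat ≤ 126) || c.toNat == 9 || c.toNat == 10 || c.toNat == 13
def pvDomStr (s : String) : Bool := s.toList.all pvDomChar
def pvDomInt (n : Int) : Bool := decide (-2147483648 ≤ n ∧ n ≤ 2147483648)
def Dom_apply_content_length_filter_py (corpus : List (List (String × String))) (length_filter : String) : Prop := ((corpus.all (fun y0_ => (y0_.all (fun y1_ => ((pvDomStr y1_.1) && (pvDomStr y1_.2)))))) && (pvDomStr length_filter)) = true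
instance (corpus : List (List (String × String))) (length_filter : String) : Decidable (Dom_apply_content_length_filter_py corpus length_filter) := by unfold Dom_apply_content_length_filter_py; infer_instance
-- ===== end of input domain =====

-- B replaces A's branch-then-filter with one classification pass that partitions
-- every doc into short/medium/long buckets, then selects the requested bucket (alternative).


-- ===== PORT A =====
-- len(doc.get('content', ''))
def pvContentLen (doc : List (String × String)) : Int :=
  PySem.Str.len ((PySem.Dict.mk doc).getD "content" "")

def apply_content_length_filter_py (corpus : List (List (String × String))) (length_filter : String) : List (List (String × String)) :=
  if length_filter == "short" then
    corpus.filter (fun doc => decide (pvContentLen doc < 200))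
  else if length_filter == "medium" then
    corpus.filter (fun doc => decide (200 ≤ pvContentLen doc ∧ pvContentLen doc < 500))
  else if length_filter == "long" then
    corpus.filter (fun doc => decide (500 ≤ pvContentLen doc))
  else
    corpus

-- ===== PORT B =====
-- "short" if n < 200 else ("medium" if n < 500 else "long")
def pvCategory (doc : List (String × String)) : String :=
  if pvContentLen doc < 200 then "short"
  else if pvContentLen doc < 500 then "medium"
  else "long"

def apply_content_length_filter_py_alt (corpus : List (List (String × String))) (length_filter : String) : List (List (String × String)) :=
  let init : PySem.Dict String (List (List (String × String))) :=
    PySem.Dict.ofList [("short", []), ("medium", []), ("long", [])]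
  let buckets := corpus.foldl (fun d doc => d.modify (pvCategory doc) [] (· ++ [doc])) init
  -- buckets.get(length_filter, corpus)
  match buckets.get? length_filter with
  | some l => l
  | none => corpus

-- ===== PRECONDITION & SPEC =====
def Spec_apply_content_length_filter_py (corpus : List (List (String × String))) (length_filter : String) (out : List (List (String × String))) : Prop := out = apply_content_length_filter_py_alt corpus length_filter
instance (corpus : List (List (String × String))) (length_filter : String) (out : List (List (String × String))) : Decidable (Spec_apply_content_length_filter_py corpus length_filter out) := by unfold Spec_apply_content_length_filter_py; infer_instance

-- ===== CLAIM (what is proved, stated in full; the proofs are below) =====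
def Claim_equal_apply_content_length_filter_py : Prop := ∀ (corpus : List (List (String × String))) (length_filter : String), Dom_apply_content_length_filter_py corpus length_filter → Spec_apply_content_length_filter_py corpus length_filter (apply_content_length_filter_py corpus length_filter)

-- ===== LEMMAS AND PROOFS =====

-- the bucket loop only ever touches the three fixed keys
theorem pv_contains_fold (corpus : List (List (String × String)))
    (d : PySem.Dict String (List (List (String × String)))) (c : String)
    (h : d.contains c = (c == "short" || c == "medium" || c == "long")) :
    (corpus.foldl (fun d doc => d.modify (pvCategory doc) [] (· ++ [doc])) d).contains c
      = (c == "short" || c == "medium" || c == "long") := by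
  induction corpus generalizing d with
  | nil => simpa using h
  | cons doc rest ih =>
    simp only [List.foldl_cons]
    apply ih
    rw [PySem.Dict.contains_modify, h]
    by_cases hc : c == pvCategory doc
    · have := hc
      unfold pvCategory at this
      split_ifs at this <;> simp_all
    · simp [hc]

-- value of the bucket at key c after the loop
theorem pv_getD_fold (corpus : List (List (String × String)))
    (d : PySem.Dict String (List (List (String × String)))) (c : String) :
    (corpus.foldl (fun d doc => d.modify (pvCategory doc) [] (· ++ [doc])) d).getD c []
      = d.getD c [] ++ corpus.filter (fun doc => pvCategory doc == c) := by
  have hm : corpus.foldl (fun d doc => d.modify (pvCategory doc) [] (· ++ [doc])) d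
      = (corpus.map (fun doc => (pvCategory doc, doc))).foldl
          (fun d p => d.modify p.1 [] (· ++ [p.2])) d := by
    rw [List.foldl_map]
  rw [hm, PySem.Dict.getD_foldl_modify_append, List.filter_map, List.map_map]
  simp [Function.comp_def]

theorem pv_get?_fold (corpus : List (List (String × String))) (c : String)
    (hc : (c == "short" || c == "medium" || c == "long") = true) :
    (corpus.foldl (fun d doc => d.modify (pvCategory doc) [] (· ++ [doc]))
        (PySem.Dict.ofList [("short", []), ("medium", []), ("long", [])])).get? c
      = some (corpus.filter (fun doc => pvCategory doc == c)) := by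
  set bk := corpus.foldl (fun d doc => d.modify (pvCategory doc) [] (· ++ [doc]))
      (PySem.Dict.ofList [("short", []), ("medium", []), ("long", [])]) with hbk
  have hccases : c = "short" ∨ c = "medium" ∨ c = "long" := by
    simp only [Bool.or_eq_true, beq_iff_eq] at hc; tauto
  have hinitc : (PySem.Dict.ofList
      [("short", ([] : List (List (String × String)))), ("medium", []), ("long", [])]).contains c
      = (c == "short" || c == "medium" || c == "long") := by
    rcases hccases with h | h | h <;> subst h <;> decide
  have hct : bk.contains c = true := by
    rw [hbk, pv_contains_fold _ _ _ hinitc]; exact hc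
  have hinit : (PySem.Dict.ofList
      [("short", ([] : List (List (String × String)))), ("medium", []), ("long", [])]).getD c [] = [] := by
    rcases hccases with h | h | h <;> subst h <;> decide
  have hgd : bk.getD c [] = corpus.filter (fun doc => pvCategory doc == c) := by
    rw [hbk, pv_getD_fold, hinit]; simp
  cases hq : bk.get? c with
  | none =>
    rw [PySem.Dict.contains_eq_isSome_get?, hq] at hct; simp at hct
  | some v =>
    rw [PySem.Dict.getD_eq_get?_getD, hq] at hgd
    simp only [Option.getD_some] at hgd
    rw [hgd]

theorem pv_get?_fold_none (corpus : List (List (String × String))) (c : String)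
    (hc : (c == "short" || c == "medium" || c == "long") = false) :
    (corpus.foldl (fun d doc => d.modify (pvCategory doc) [] (· ++ [doc]))
        (PySem.Dict.ofList [("short", []), ("medium", []), ("long", [])])).get? c = none := by
  have hct := pv_contains_fold corpus
      (PySem.Dict.ofList [("short", []), ("medium", []), ("long", [])]) c (by
        simp only [hc]
        revert hc
        simp only [Bool.or_eq_false_iff, beq_eq_false_iff_ne, ne_eq, and_imp]
        intro h1 h2 h3
        have hk : (PySem.Dict.ofList [("short", ([] : List (List (String × String)))),
            ("medium", []), ("long", [])]).keys = ["short", "medium", "long"] := by decide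
        simp [PySem.Dict.contains_eq_decide_mem_keys, hk, h1, h2, h3])
  rw [hc] at hct
  rw [PySem.Dict.contains_eq_isSome_get?] at hct
  cases hq : _root_.id ((corpus.foldl (fun d doc => d.modify (pvCategory doc) [] (· ++ [doc]))
      (PySem.Dict.ofList [("short", []), ("medium", []), ("long", [])])).get? c) with
  | none => simpa using hq
  | some v => simp only [_root_.id] at hq; rw [hq] at hct; simp at hct

theorem pv_equal (corpus : List (List (String × String))) (length_filter : String) :
    apply_content_length_filter_py corpus length_filter
      = apply_content_length_filter_py_alt corpus length_filter := by
  by_cases hs : length_filter = "short"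
  · subst hs
    simp only [apply_content_length_filter_py, apply_content_length_filter_py_alt,
      pv_get?_fold _ "short" (by decide)]
    simp only [beq_self_eq_true, if_true]
    exact List.filter_congr (fun doc _ => by
      unfold pvCategory; split_ifs with h1 h2 <;> simp_all)
  · by_cases hm : length_filter = "medium"
    · subst hm
      simp only [apply_content_length_filter_py, apply_content_length_filter_py_alt,
        pv_get?_fold _ "medium" (by decide)]
      norm_num
      exact List.filter_congr (fun doc _ => by
        unfold pvCategory; split_ifs with h1 h2 <;> simp_all <;> omega)
    · by_cases hl : length_filter = "long"
      · subst hl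
        simp only [apply_content_length_filter_py, apply_content_length_filter_py_alt,
          pv_get?_fold _ "long" (by decide)]
        norm_num
        exact List.filter_congr (fun doc _ => by
          unfold pvCategory; split_ifs with h1 h2 <;> simp_all <;> omega)
      · have hc : (length_filter == "short" || length_filter == "medium"
            || length_filter == "long") = false := by simp [hs, hm, hl]
        simp only [apply_content_length_filter_py, apply_content_length_filter_py_alt,
          pv_get?_fold_none _ length_filter hc]
        simp [hs, hm, hl]

-- ===== VERDICT (by name: the statement is the Claim_ definition above) =====
theorem apply_content_length_filter_py_spec : Claim_equal_apply_content_length_filter_py := by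
  intro corpus length_filter _
  exact pv_equal corpus length_filter
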